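-- pv_equiv track=rewrite | github.com/SzymonIwaniuk/data_structures_and_algorithms | exams/2020_2021/egz0/tanagram/tanagram.py | tanagram
-- ===== SOURCE A (Python) =====
-- def tanagram(x, y, t):
--     # nlogn
--     n = len(x)
--     m = len(y)
--
--     if m != n:
--         return False
--
--     string_x = list(enumerate(list(x)))
--     string_y = list(enumerate(list(y)))
--
--     string_x.sort(key=lambda ch: ch[1])
--     string_y.sort(key=lambda ch: ch[1])
--
--     for i in range(n):
--         pos1 = string_x[i][0]
--         ch1 = string_x[i][1]
--         pos2 = string_y[i][0]
--         ch2 = string_y[i][1]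
--
--
--         if abs(pos1 - pos2) > t or ch1 != ch2:
--             return False
--
--     return True
-- ===== SOURCE B (Python) =====
-- def tanagram(x, y, t):
--     # Group positions by character (dict keeps insertion order), then
--     # compare the per-character position lists elementwise.
--     if len(x) != len(y):
--         return False
--     gx = {}
--     for i, c in enumerate(x):
--         gx.setdefault(c, []).append(i)
--     gy = {}
--     for i, c in enumerate(y):
--         gy.setdefault(c, []).append(i)
--     if len(gx) != len(gy):
--         return False
--     for c, ps in gx.items():
--         qs = gy.get(c)
--         if qs is None or len(qs) != len(ps):
--             return False
--         for p, q in zip(ps, qs):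
--             if abs(p - q) > t:
--                 return False
--     return True
-- ===== Notes on version B (the rewrite author's own statement) =====
-- stated objective: faster
-- what changed: Replaces sorting both enumerated strings by character and scanning the merged order with a single pass building a dict mapping each character to its list of positions, then comparing the per-character position lists elementwise (O(n) grouping instead of O(n log n) sorting).
import Mathlib
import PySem

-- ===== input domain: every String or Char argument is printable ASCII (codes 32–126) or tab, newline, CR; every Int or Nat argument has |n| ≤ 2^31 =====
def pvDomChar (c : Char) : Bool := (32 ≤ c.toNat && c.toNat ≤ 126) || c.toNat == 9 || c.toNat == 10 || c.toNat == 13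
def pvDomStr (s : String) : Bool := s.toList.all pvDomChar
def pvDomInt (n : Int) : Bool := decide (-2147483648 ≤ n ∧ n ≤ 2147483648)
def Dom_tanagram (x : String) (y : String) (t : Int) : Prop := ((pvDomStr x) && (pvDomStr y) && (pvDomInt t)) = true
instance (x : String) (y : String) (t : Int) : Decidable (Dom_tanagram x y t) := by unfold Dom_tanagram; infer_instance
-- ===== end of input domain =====

-- B replaces sort-both-enumerations-and-scan by a one-pass dict grouping positions per character and an elementwise comparison of the per-character position lists (a different, O(n) algorithm).


-- ===== PORT A =====
def tanagram (x : String) (y : String) (t : Int) : Bool :=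
  let n : Int := PySem.Str.len x
  let m : Int := PySem.Str.len y
  if m ≠ n then false
  else
    let string_x := PySem.List.sorted (PySem.List.enumerate x.toList 0) (fun p => p.2)
    let string_y := PySem.List.sorted (PySem.List.enumerate y.toList 0) (fun p => p.2)
    (PySem.List.pyRange 0 n 1).all (fun i =>
      let p1 := PySem.List.pyGetD string_x i (0, ' ')   -- index always in range: i < n = length
      let p2 := PySem.List.pyGetD string_y i (0, ' ')
      decide (|p1.1 - p2.1| ≤ t) && (p1.2 == p2.2))

-- ===== PORT B =====
def tanagram_alt (x : String) (y : String) (t : Int) : Bool :=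
  if PySem.Str.len x ≠ PySem.Str.len y then false
  else
    let gx := (PySem.List.enumerate x.toList 0).foldl
      (fun d p => d.modify p.2 [] (fun ps => ps ++ [p.1])) (PySem.Dict.empty : PySem.Dict Char (List Int))
    let gy := (PySem.List.enumerate y.toList 0).foldl
      (fun d p => d.modify p.2 [] (fun ps => ps ++ [p.1])) (PySem.Dict.empty : PySem.Dict Char (List Int))
    if PySem.Dict.size gx ≠ PySem.Dict.size gy then false
    else gx.items.all (fun e =>
      match gy.get? e.1 with
      | none => false
      | some qs =>
        (qs.length == e.2.length) &&
        ((e.2.zip qs).all (fun pq => decide (|pq.1 - pq.2| ≤ t))))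

-- ===== PRECONDITION & SPEC =====
def Spec_tanagram (x : String) (y : String) (t : Int) (out : Bool) : Prop := out = tanagram_alt x y t
instance (x : String) (y : String) (t : Int) (out : Bool) : Decidable (Spec_tanagram x y t out) := by unfold Spec_tanagram; infer_instance

-- ===== CLAIM (what is proved, stated in full; the proofs are below) =====
def Claim_equal_tanagram : Prop := ∀ (x : String) (y : String) (t : Int), Dom_tanagram x y t → Spec_tanagram x y t (tanagram x y t)

-- ===== LEMMAS AND PROOFS =====

-- proof-side abbreviations
def pvD (l : List Char) : List Char := PySem.List.sorted (PySem.Set.ofList l) (fun c => c)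
def pvG (l : List Char) (c : Char) : List (Int × Char) :=
  (PySem.List.enumerate l 0).filter (fun p => p.2 == c)
def pvPos (l : List Char) (c : Char) : List Int := (pvG l c).map (fun p => p.1)
def pvOK (t : Int) (cs ds : List Char) (c : Char) : Bool :=
  ((pvPos cs c).zip (pvPos ds c)).all (fun pq => decide (|pq.1 - pq.2| ≤ t))
def pvR (t : Int) (cs ds : List Char) : Prop := cs.Perm ds ∧ ∀ c, pvOK t cs ds c = true
def pvQ (t : Int) : (Int × Char) × (Int × Char) → Bool :=
  fun pq => decide (|pq.1.1 - pq.2.1| ≤ t) && (pq.1.2 == pq.2.2)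

-- insertBy equations
lemma pv_insertBy_nil {α : Type} (before : α → α → Bool) (a : α) :
    PySem.List.insertBy before a [] = [a] := rfl
lemma pv_insertBy_cons {α : Type} (before : α → α → Bool) (a y : α) (ys : List α) :
    PySem.List.insertBy before a (y :: ys) =
      if before a y then a :: y :: ys else y :: PySem.List.insertBy before a ys := rfl

lemma pv_insertBy_skip {α : Type} (before : α → α → Bool) (a : α) (ys zs : List α)
    (h : ∀ y ∈ ys, before a y = false) :
    PySem.List.insertBy before a (ys ++ zs) = ys ++ PySem.List.insertBy before a zs := by
  induction ys with
  | nil => simp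
  | cons y ys ih =>
    simp only [List.cons_append, pv_insertBy_cons, h y (by simp)]
    simp [ih (fun y hy => h y (by simp [hy]))]

lemma pv_insertBy_front {α : Type} (before : α → α → Bool) (a : α) (zs : List α)
    (h : ∀ y ∈ zs, before a y = true) :
    PySem.List.insertBy before a zs = a :: zs := by
  cases zs with
  | nil => rfl
  | cons z zs => simp [pv_insertBy_cons, h z (by simp)]

lemma pv_flatMap_if_none {b : Char} {x : Int × Char} (g : Char → List (Int × Char)) :
    ∀ D : List Char, (∀ c ∈ D, b ≠ c) →
      D.flatMap (fun c => g c ++ if b == c then [x] else []) = D.flatMap g := by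
  intro D h
  induction D with
  | nil => rfl
  | cons c D ih =>
    have hc : (b == c) = false := by simp [h c (by simp)]
    simp only [List.flatMap_cons, hc, Bool.false_eq_true, ↓reduceIte, List.append_nil,
      ih (fun c' hc' => h c' (by simp [hc']))]

-- inserting an element into a key-grouped list: existing key
lemma pv_insert_grouped_mem (a : Int × Char) (D : List Char) (g : Char → List (Int × Char))
    (hD : D.Pairwise (· < ·)) (hg : ∀ c, ∀ p ∈ g c, p.2 = c) (hmem : a.2 ∈ D) :
    PySem.List.insertBy (fun p q => decide (p.2 < q.2)) a (D.flatMap g) =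
      D.flatMap (fun c => g c ++ if a.2 == c then [a] else []) := by
  induction D with
  | nil => simp at hmem
  | cons c D ih =>
    rw [List.pairwise_cons] at hD
    obtain ⟨hcd, hD'⟩ := hD
    rw [List.flatMap_cons, List.flatMap_cons]
    by_cases hac : a.2 = c
    · have hskip : ∀ y ∈ g c, (fun p q => decide ((p : Int × Char).2 < q.2)) a y = false := by
        intro y hy
        simp [hg c y hy, hac]
      rw [pv_insertBy_skip _ _ _ _ hskip]
      have hfront : ∀ y ∈ D.flatMap g, (fun p q => decide ((p : Int × Char).2 < q.2)) a y = true := by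
        intro y hy
        rw [List.mem_flatMap] at hy
        obtain ⟨c', hc', hy⟩ := hy
        simp only [decide_eq_true_eq, hg c' y hy, hac]
        exact hcd c' hc'
      rw [pv_insertBy_front _ _ _ hfront]
      have hbc : (a.2 == c) = true := by simp [hac]
      rw [pv_flatMap_if_none g D (fun c' hc' => by rw [hac]; exact ne_of_lt (hcd c' hc'))]
      simp [hbc]
    · have hmem' : a.2 ∈ D := by
        rcases List.mem_cons.mp hmem with h' | h'
        · exact absurd h' hac
        · exact h'
      have hlt : c < a.2 := hcd _ hmem'
      have hskip : ∀ y ∈ g c, (fun p q => decide ((p : Int × Char).2 < q.2)) a y = false := by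
        intro y hy
        simp only [hg c y hy, decide_eq_false_iff_not]
        exact fun h' => lt_asymm hlt h'
      rw [pv_insertBy_skip _ _ _ _ hskip, ih hD' hmem']
      have hbc : (a.2 == c) = false := by simp [hac]
      simp [hbc]

-- inserting an element into a key-grouped list: new key
lemma pv_insert_grouped_new (a : Int × Char) (D : List Char) (g : Char → List (Int × Char))
    (hD : D.Pairwise (· < ·)) (hg : ∀ c, ∀ p ∈ g c, p.2 = c) (hmem : a.2 ∉ D)
    (hga : g a.2 = []) :
    PySem.List.insertBy (fun p q => decide (p.2 < q.2)) a (D.flatMap g) =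
      (PySem.List.insertBy (fun c d => decide (c < d)) a.2 D).flatMap
        (fun c => g c ++ if a.2 == c then [a] else []) := by
  induction D with
  | nil => simp [pv_insertBy_nil, hga]
  | cons c D ih =>
    rw [List.pairwise_cons] at hD
    obtain ⟨hcd, hD'⟩ := hD
    have hne : a.2 ≠ c := fun e => hmem (e ▸ List.mem_cons_self)
    have hmem' : a.2 ∉ D := fun h' => hmem (List.mem_cons_of_mem _ h')
    by_cases hlt : a.2 < c
    · have hfront : ∀ y ∈ (c :: D).flatMap g,
          (fun p q => decide ((p : Int × Char).2 < q.2)) a y = true := by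
        intro y hy
        rw [List.mem_flatMap] at hy
        obtain ⟨c', hc', hy⟩ := hy
        simp only [decide_eq_true_eq, hg c' y hy]
        rcases List.mem_cons.mp hc' with h' | h'
        · exact h' ▸ hlt
        · exact lt_trans hlt (hcd c' h')
      have hno : ∀ c' ∈ c :: D, a.2 ≠ c' := by
        intro c' hc'
        rcases List.mem_cons.mp hc' with h' | h'
        · exact h' ▸ hne
        · exact ne_of_lt (lt_trans hlt (hcd c' h'))
      rw [pv_insertBy_front _ _ _ hfront, pv_insertBy_cons,
        if_pos (by simp [hlt] : ((fun c d => decide ((c : Char) < d)) a.2 c) = true)]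
      conv_rhs => rw [List.flatMap_cons, pv_flatMap_if_none g (c :: D) hno]
      simp [hga]
    · have hclt : c < a.2 := lt_of_le_of_ne (not_lt.mp hlt) (fun e => hne e.symm)
      have hskip : ∀ y ∈ g c, (fun p q => decide ((p : Int × Char).2 < q.2)) a y = false := by
        intro y hy
        simp only [hg c y hy, decide_eq_false_iff_not]
        exact fun h' => lt_asymm hclt h'
      rw [List.flatMap_cons, pv_insertBy_skip _ _ _ _ hskip, ih hD' hmem', pv_insertBy_cons]
      have : decide (a.2 < c) = false := by simp [hlt]
      rw [this]
      simp [hne]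

-- THE stability/grouping characterisation of A's sort
lemma pv_sorted_group (l : List (Int × Char)) :
    PySem.List.sorted l (fun p => p.2) =
      (PySem.List.sorted (PySem.Set.ofList (l.map (fun p => p.2))) (fun c => c)).flatMap
        (fun c => l.filter (fun p => p.2 == c)) := by
  induction l using List.reverseRecOn with
  | nil => rfl
  | append_singleton l a ih =>
    rw [PySem.List.sorted_eq_foldl_insertBy (l ++ [a]), List.foldl_append,
      ← PySem.List.sorted_eq_foldl_insertBy, ih]
    simp only [List.foldl_cons, List.foldl_nil]
    have hD := PySem.List.sorted_ofList_pairwise_lt (l.map (fun p => p.2))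
    have hg : ∀ c, ∀ p ∈ l.filter (fun p => p.2 == c), p.2 = c := by
      intro c p hp
      exact beq_iff_eq.mp (List.mem_filter.mp hp).2
    have hmap : (l ++ [a]).map (fun p => p.2) = l.map (fun p => p.2) ++ [a.2] := by simp
    by_cases hm : a.2 ∈ l.map (fun p => p.2)
    · have hmem : a.2 ∈ PySem.List.sorted (PySem.Set.ofList (l.map (fun p => p.2))) (fun c => c) :=
        (PySem.List.mem_sorted _ _ _ _).mpr ((PySem.Set.mem_ofList _ _).mpr hm)
      rw [pv_insert_grouped_mem a _ _ hD hg hmem, hmap, PySem.Set.ofList_append_singleton,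
        PySem.Set.add_of_mem ((PySem.Set.mem_ofList _ _).mpr hm)]
      simp [List.filter_append, List.filter_singleton, Bool.cond_eq_ite]
    · have hmem : a.2 ∉ PySem.List.sorted (PySem.Set.ofList (l.map (fun p => p.2))) (fun c => c) :=
        fun h' => hm ((PySem.Set.mem_ofList _ _).mp ((PySem.List.mem_sorted _ _ _ _).mp h'))
      have hga : l.filter (fun p => p.2 == a.2) = [] := by
        rw [List.filter_eq_nil_iff]
        intro p hp hpa
        exact hm (List.mem_map.mpr ⟨p, hp, beq_iff_eq.mp hpa⟩)
      rw [pv_insert_grouped_new a _ _ hD hg hmem hga, hmap, PySem.Set.ofList_append_singleton,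
        PySem.Set.add_of_not_mem (fun h' => hm ((PySem.Set.mem_ofList _ _).mp h')),
        PySem.List.sorted_eq_foldl_insertBy
          ((PySem.Set.ofList (l.map (fun p => p.2)) : List Char) ++ [a.2]),
        List.foldl_append, ← PySem.List.sorted_eq_foldl_insertBy]
      simp only [List.foldl_cons, List.foldl_nil]
      simp [List.filter_append, List.filter_singleton, Bool.cond_eq_ite]

lemma pv_sorted_group' (cs : List Char) :
    PySem.List.sorted (PySem.List.enumerate cs 0) (fun p => p.2) = (pvD cs).flatMap (pvG cs) := by
  have h := pv_sorted_group (PySem.List.enumerate cs 0)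
  rw [PySem.List.map_snd_enumerate] at h
  exact h

-- lengths and counts
lemma pv_count_aux (c : Char) : ∀ (l : List Char) (s : Int),
    ((PySem.List.enumerate l s).filter (fun p => p.2 == c)).length = l.count c := by
  intro l
  induction l with
  | nil => intro s; simp [PySem.List.enumerate]
  | cons d l ih =>
    intro s
    rw [PySem.List.enumerate_cons]
    by_cases h : d = c
    · simp [h, ih (s + 1)]
    · simp [h, ih (s + 1)]

lemma pv_len_G (l : List Char) (c : Char) : (pvG l c).length = l.count c :=
  pv_count_aux c l 0

lemma pv_len_pos (l : List Char) (c : Char) : (pvPos l c).length = l.count c := by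
  rw [pvPos, List.length_map, pv_len_G]

lemma pv_pairs_const {c : Char} :
    ∀ (u : List (Int × Char)), (∀ p ∈ u, p.2 = c) →
      u = (u.map (fun p => p.1)).map (fun i => (i, c)) := by
  intro u
  induction u with
  | nil => intro _; rfl
  | cons p u ih =>
    intro h
    have hp : p = (p.1, c) := by
      have := h p (by simp)
      exact Prod.ext rfl this
    simp only [List.map_cons]
    rw [← ih (fun q hq => h q (by simp [hq])), ← hp]

lemma pv_G_eq_map (l : List Char) (c : Char) :
    pvG l c = (pvPos l c).map (fun i => (i, c)) := by
  rw [pvPos]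
  exact pv_pairs_const (pvG l c) (fun p hp => beq_iff_eq.mp (List.mem_filter.mp hp).2)

lemma pv_G_nil_of_not_mem (l : List Char) (c : Char) (h : c ∉ l) : pvG l c = [] := by
  rw [pvG, List.filter_eq_nil_iff]
  intro p hp hpc
  have : p.2 ∈ l := by
    have := List.mem_map_of_mem (f := fun p => (p : Int × Char).2) hp
    rwa [PySem.List.map_snd_enumerate] at this
  exact h (beq_iff_eq.mp hpc ▸ this)

-- the index loop over two equal-length lists is the zip loop
lemma pv_range_all_zip_nat {α : Type} (g : α × α → Bool) (d : α) :
    ∀ (u v : List α), u.length = v.length →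
      ((List.range u.length).all (fun k => g (u.getD k d, v.getD k d)) = (u.zip v).all g) := by
  intro u
  induction u with
  | nil => intro v h; simp
  | cons a u ih =>
    intro v h
    cases v with
    | nil => simp at h
    | cons b v =>
      rw [List.length_cons, List.range_succ_eq_map, List.all_cons, List.all_map]
      have hrec : (List.range u.length).all
          (fun k => g ((a :: u).getD (k + 1) d, (b :: v).getD (k + 1) d))
          = (u.zip v).all g := by
        have := ih v (by simpa using h)
        simpa using this
      rw [List.zip_cons_cons, List.all_cons, ← hrec]
      rfl

lemma pv_range_all_zip {α : Type} (u v : List α) (d : α) (g : α × α → Bool)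
    (h : u.length = v.length) :
    (PySem.List.pyRange 0 (u.length : Int) 1).all
        (fun i => g (PySem.List.pyGetD u i d, PySem.List.pyGetD v i d))
      = (u.zip v).all g := by
  have hr : PySem.List.pyRange 0 (u.length : Int) 1 =
      (List.range u.length).map (fun k : Nat => (k : Int)) := PySem.List.pyRange_zero_nat u.length
  rw [hr, List.all_map]
  simp only [Function.comp_def]
  simp only [PySem.List.pyGetD_natCast]
  exact pv_range_all_zip_nat g d u v h

-- pointwise-equal snds
lemma pv_map_snd_eq : ∀ {u v : List (Int × Char)}, u.length = v.length →
    (∀ pq ∈ u.zip v, pq.1.2 = pq.2.2) →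
    u.map (fun p => p.2) = v.map (fun p => p.2) := by
  intro u
  induction u with
  | nil => intro v h _; cases v with
    | nil => rfl
    | cons b v => simp at h
  | cons a u ih =>
    intro v h hall
    cases v with
    | nil => simp at h
    | cons b v =>
      simp only [List.map_cons]
      rw [hall (a, b) (by simp), ih (by simpa using h) (fun pq hpq => hall pq (by simp [hpq]))]

-- filtering both sides of a snd-aligned zip
lemma pv_zip_filter (c : Char) : ∀ {u v : List (Int × Char)}, u.length = v.length →
    (∀ pq ∈ u.zip v, pq.1.2 = pq.2.2) →
    (u.filter (fun p => p.2 == c)).zip (v.filter (fun p => p.2 == c))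
      = (u.zip v).filter (fun pq => pq.1.2 == c) := by
  intro u
  induction u with
  | nil => intro v h _; cases v with
    | nil => rfl
    | cons b v => simp at h
  | cons a u ih =>
    intro v h hall
    cases v with
    | nil => simp at h
    | cons b v =>
      have hab : a.2 = b.2 := hall (a, b) (by simp)
      have hrec := ih (v := v) (by simpa using h) (fun pq hpq => hall pq (by simp [hpq]))
      by_cases hc : a.2 = c
      · simp only [List.zip_cons_cons, List.filter_cons]
        have h1 : (a.2 == c) = true := by simp [hc]
        have h2 : (b.2 == c) = true := by simp [← hab, hc]
        simp [h1, h2, hrec]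
      · simp only [List.zip_cons_cons, List.filter_cons]
        have h1 : (a.2 == c) = false := by simp [hc]
        have h2 : (b.2 == c) = false := by simp [← hab, hc]
        simp [h1, h2, hrec]

-- filter distributes over the grouped flatMap and picks the one group
lemma pv_filter_flatMap (c : Char) : ∀ (D : List Char) (g : Char → List (Int × Char)),
    (∀ c', ∀ p ∈ g c', p.2 = c') → D.Nodup →
    (D.flatMap g).filter (fun p => p.2 == c) = if c ∈ D then g c else [] := by
  intro D
  induction D with
  | nil => intro g _ _; simp
  | cons c' D ih =>
    intro g hg hnd
    rw [List.nodup_cons] at hnd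
    rw [List.flatMap_cons, List.filter_append, ih g hg hnd.2]
    by_cases h : c' = c
    · subst h
      rw [List.filter_eq_self.mpr (fun p hp => beq_iff_eq.mpr (hg c' p hp))]
      rw [if_neg hnd.1, if_pos List.mem_cons_self]
      simp
    · have h1 : (g c').filter (fun p => p.2 == c) = [] := by
        rw [List.filter_eq_nil_iff]
        intro p hp hpc
        exact h ((hg c' p hp).symm.trans (beq_iff_eq.mp hpc))
      rw [h1]
      by_cases hm : c ∈ D
      · simp [hm, List.mem_cons]
      · have hcc : c ∉ c' :: D := by
          intro hmem'
          rcases List.mem_cons.mp hmem' with e | e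
          · exact h e.symm
          · exact hm e
        simp [hm, hcc]

-- zip of two flatMaps over the same spine with equal chunk lengths
lemma pv_zip_flatMap : ∀ (D : List Char) (g h : Char → List (Int × Char)),
    (∀ c ∈ D, (g c).length = (h c).length) →
    (D.flatMap g).zip (D.flatMap h) = D.flatMap (fun c => (g c).zip (h c)) := by
  intro D
  induction D with
  | nil => intro g h _; rfl
  | cons c D ih =>
    intro g h hl
    rw [List.flatMap_cons, List.flatMap_cons, List.flatMap_cons,
      List.zip_append (hl c (by simp)), ih g h (fun c' hc' => hl c' (by simp [hc']))]

-- B's dict, characterised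
lemma pv_groups_getD (l : List Char) (c : Char) :
    ((PySem.List.enumerate l 0).foldl (fun d p => d.modify p.2 [] (fun ps => ps ++ [p.1]))
        (PySem.Dict.empty : PySem.Dict Char (List Int))).getD c [] = pvPos l c := by
  have h1 : (PySem.List.enumerate l 0).foldl
      (fun d p => d.modify p.2 [] (fun ps => ps ++ [p.1]))
      (PySem.Dict.empty : PySem.Dict Char (List Int))
      = ((PySem.List.enumerate l 0).map (fun p => (p.2, p.1))).foldl
        (fun d q => d.modify q.1 [] (fun ps => ps ++ [q.2]))
        (PySem.Dict.empty : PySem.Dict Char (List Int)) := by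
    rw [List.foldl_map]
  rw [h1, PySem.Dict.getD_foldl_modify_append]
  rw [List.filter_map]
  simp only [List.map_map, Function.comp_def]
  rw [pvPos, pvG]
  simp [PySem.Dict.getD_empty]

lemma pv_groups_keys (l : List Char) :
    ((PySem.List.enumerate l 0).foldl (fun d p => d.modify p.2 [] (fun ps => ps ++ [p.1]))
        (PySem.Dict.empty : PySem.Dict Char (List Int))).keys = PySem.Set.ofList l := by
  rw [PySem.Dict.keys_foldl_modify_key (PySem.List.enumerate l 0) (fun p => p.2) []
    (fun _ p => (fun ps => ps ++ [p.1]))]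
  rw [PySem.Dict.keys_empty, PySem.List.map_snd_enumerate]
  rfl

-- the two sides, reduced to pvR
lemma pv_nodup_D (l : List Char) : (pvD l).Nodup :=
  (PySem.List.sorted_ofList_pairwise_lt l).imp ne_of_lt

lemma pv_hg_filter (u : List (Int × Char)) :
    ∀ c', ∀ p ∈ u.filter (fun p => p.2 == c'), p.2 = c' :=
  fun _ p hp => beq_iff_eq.mp (List.mem_filter.mp hp).2

lemma pv_filter_sorted (cs : List Char) (c : Char) (hc : c ∈ cs) :
    (PySem.List.sorted (PySem.List.enumerate cs 0) (fun p => p.2)).filter (fun p => p.2 == c)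
      = pvG cs c := by
  rw [pv_sorted_group' cs]
  have : ∀ c', ∀ p ∈ pvG cs c', p.2 = c' := fun c' => pv_hg_filter (PySem.List.enumerate cs 0) c'
  rw [pv_filter_flatMap c (pvD cs) (pvG cs) this (pv_nodup_D cs)]
  rw [if_pos]
  rw [pvD, PySem.List.mem_sorted, PySem.Set.mem_ofList]
  exact hc

lemma pv_A_true_iff (x y : String) (t : Int) (h : x.toList.length = y.toList.length) :
    tanagram x y t = true ↔ pvR t x.toList y.toList := by
  have hlen : (PySem.List.sorted (PySem.List.enumerate x.toList 0) (fun p => p.2)).length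
      = (PySem.List.sorted (PySem.List.enumerate y.toList 0) (fun p => p.2)).length := by
    simp [PySem.List.length_sorted, PySem.List.length_enumerate, h]
  have hA : tanagram x y t
      = ((PySem.List.sorted (PySem.List.enumerate x.toList 0) (fun p => p.2)).zip
          (PySem.List.sorted (PySem.List.enumerate y.toList 0) (fun p => p.2))).all (pvQ t) := by
    unfold tanagram
    have hmn : ¬ (PySem.Str.len y ≠ PySem.Str.len x) := by
      simp [PySem.Str.len_eq, h]
    rw [if_neg hmn]
    have hn : PySem.Str.len x
        = ((PySem.List.sorted (PySem.List.enumerate x.toList 0) (fun p => p.2)).length : Int) := by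
      simp [PySem.Str.len_eq, PySem.List.length_sorted, PySem.List.length_enumerate]
    rw [hn]
    exact pv_range_all_zip _ _ (0, ' ') (pvQ t) hlen
  rw [hA]
  set sx := PySem.List.sorted (PySem.List.enumerate x.toList 0) (fun p => p.2) with hsx
  set sy := PySem.List.sorted (PySem.List.enumerate y.toList 0) (fun p => p.2) with hsy
  constructor
  · intro hall
    rw [List.all_eq_true] at hall
    have hsnd : ∀ pq ∈ sx.zip sy, pq.1.2 = pq.2.2 := by
      intro pq hpq
      have := hall pq hpq
      simp only [pvQ, Bool.and_eq_true, beq_iff_eq, decide_eq_true_eq] at this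
      exact this.2
    have habs : ∀ pq ∈ sx.zip sy, |pq.1.1 - pq.2.1| ≤ t := by
      intro pq hpq
      have := hall pq hpq
      simp only [pvQ, Bool.and_eq_true, beq_iff_eq, decide_eq_true_eq] at this
      exact this.1
    have hmapsnd := pv_map_snd_eq hlen hsnd
    have hcx : x.toList.Perm (sx.map (fun p => p.2)) := by
      have h1 := (PySem.List.sorted_perm (PySem.List.enumerate x.toList 0) (fun p => p.2)
        false).map (fun p => p.2)
      rw [PySem.List.map_snd_enumerate] at h1
      exact (h1.symm : _)
    have hcy : (sy.map (fun p => p.2)).Perm y.toList := by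
      have h1 := (PySem.List.sorted_perm (PySem.List.enumerate y.toList 0) (fun p => p.2)
        false).map (fun p => p.2)
      rwa [PySem.List.map_snd_enumerate] at h1
    have hperm : x.toList.Perm y.toList := (hcx.trans (hmapsnd ▸ List.Perm.refl _)).trans hcy
    refine ⟨hperm, fun c => ?_⟩
    by_cases hc : c ∈ x.toList
    · have hcd : c ∈ y.toList := hperm.mem_iff.mp hc
      have hfx := pv_filter_sorted x.toList c hc
      have hfy := pv_filter_sorted y.toList c hcd
      rw [pvOK, pvPos, pvPos, ← hfx, ← hfy, List.zip_map,
        pv_zip_filter c hlen hsnd, List.all_map, List.all_eq_true]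
      intro pq hpq
      have hmem := (List.mem_filter.mp hpq).1
      simp only [Function.comp_apply, decide_eq_true_eq]
      exact habs pq hmem
    · simp [pvOK, pvPos, pv_G_nil_of_not_mem x.toList c hc]
  · rintro ⟨hperm, hok⟩
    have hDeq : pvD y.toList = pvD x.toList := by
      rw [pvD, pvD]
      refine PySem.List.sorted_eq_sorted_of_perm _ _ (fun c => c) (fun a b e => e) ?_
      exact (List.perm_ext_iff_of_nodup (PySem.Set.nodup_ofList _)
        (PySem.Set.nodup_ofList _)).mpr
        (fun a => by rw [PySem.Set.mem_ofList, PySem.Set.mem_ofList]; exact hperm.symm.mem_iff)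
    have hl : ∀ c ∈ pvD x.toList, (pvG x.toList c).length = (pvG y.toList c).length := by
      intro c _
      rw [pv_len_G, pv_len_G, hperm.count_eq]
    rw [List.all_eq_true]
    intro pq hpq
    rw [hsx, hsy, pv_sorted_group' x.toList, pv_sorted_group' y.toList, hDeq,
      pv_zip_flatMap _ _ _ hl, List.mem_flatMap] at hpq
    obtain ⟨c, hcD, hpq⟩ := hpq
    rw [pv_G_eq_map x.toList c, pv_G_eq_map y.toList c, List.zip_map, List.mem_map] at hpq
    obtain ⟨ij, hij, rfl⟩ := hpq
    have hoc := hok c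
    rw [pvOK, List.all_eq_true] at hoc
    have h2 := hoc ij hij
    simp only [decide_eq_true_eq] at h2
    simp only [pvQ, Bool.and_eq_true, beq_iff_eq, decide_eq_true_eq]
    exact ⟨h2, rfl⟩

lemma pv_B_true_iff (x y : String) (t : Int) (h : x.toList.length = y.toList.length) :
    tanagram_alt x y t = true ↔ pvR t x.toList y.toList := by
  unfold tanagram_alt
  have hmn : ¬ (PySem.Str.len x ≠ PySem.Str.len y) := by
    simp [PySem.Str.len_eq, h]
  rw [if_neg hmn]
  set Gx : PySem.Dict Char (List Int) :=
    (PySem.List.enumerate x.toList 0).foldl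
      (fun d p => d.modify p.2 [] (fun ps => ps ++ [p.1])) PySem.Dict.empty with hGx
  set Gy : PySem.Dict Char (List Int) :=
    (PySem.List.enumerate y.toList 0).foldl
      (fun d p => d.modify p.2 [] (fun ps => ps ++ [p.1])) PySem.Dict.empty with hGy
  show (if PySem.Dict.size Gx ≠ PySem.Dict.size Gy then false
      else Gx.items.all fun e =>
        match Gy.get? e.1 with
        | none => false
        | some qs => qs.length == e.2.length &&
            (e.2.zip qs).all fun pq => decide (|pq.1 - pq.2| ≤ t)) = true
      ↔ pvR t x.toList y.toList
  have hkx : Gx.keys = PySem.Set.ofList x.toList := by rw [hGx]; exact pv_groups_keys x.toList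
  have hky : Gy.keys = PySem.Set.ofList y.toList := by rw [hGy]; exact pv_groups_keys y.toList
  have hndx : Gx.keys.Nodup := by rw [hkx]; exact PySem.Set.nodup_ofList _
  have hndy : Gy.keys.Nodup := by rw [hky]; exact PySem.Set.nodup_ofList _
  have hgdx : ∀ c, Gx.getD c [] = pvPos x.toList c := by
    intro c; rw [hGx]; exact pv_groups_getD x.toList c
  have hgdy : ∀ c, Gy.getD c [] = pvPos y.toList c := by
    intro c; rw [hGy]; exact pv_groups_getD y.toList c
  have hsome : ∀ c ∈ y.toList, Gy.get? c = some (pvPos y.toList c) := by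
    intro c hc
    cases hq : Gy.get? c with
    | none =>
      rw [PySem.Dict.get?_eq_none_iff_not_mem_keys, hky] at hq
      exact absurd ((PySem.Set.mem_ofList _ _).mpr hc) hq
    | some v =>
      have hv := PySem.Dict.getD_of_get?_eq_some Gy ([] : List Int) hq
      rw [hgdy c] at hv
      rw [hv]
  have hszx : PySem.Dict.size Gx = (PySem.Set.ofList x.toList).length := by
    rw [PySem.Dict.size, PySem.Dict.items_eq_map_keys Gx hndx ([] : List Int),
      List.length_map, hkx]
  have hszy : PySem.Dict.size Gy = (PySem.Set.ofList y.toList).length := by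
    rw [PySem.Dict.size, PySem.Dict.items_eq_map_keys Gy hndy ([] : List Int),
      List.length_map, hky]
  rw [hszx, hszy, PySem.Dict.items_eq_map_keys Gx hndx ([] : List Int), hkx, List.all_map]
  simp only [Function.comp_def, hgdx]
  by_cases hsz : (PySem.Set.ofList x.toList).length = (PySem.Set.ofList y.toList).length
  · rw [if_neg (by simpa using hsz)]
    rw [List.all_eq_true]
    constructor
    · intro hall
      have hsub : ∀ c ∈ x.toList, c ∈ y.toList := by
        intro c hc
        have hi := hall c ((PySem.Set.mem_ofList _ _).mpr hc)
        by_contra hd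
        have hnone : Gy.get? c = none := by
          rw [PySem.Dict.get?_eq_none_iff_not_mem_keys, hky, PySem.Set.mem_ofList]
          exact hd
        rw [hnone] at hi
        simp at hi
      have hkeys : (PySem.Set.ofList x.toList).Perm (PySem.Set.ofList y.toList) := by
        refine ((PySem.Set.nodup_ofList x.toList).subperm ?_).perm_of_length_le
          (le_of_eq hsz.symm)
        intro c hc
        exact (PySem.Set.mem_ofList _ _).mpr
          (hsub c ((PySem.Set.mem_ofList _ _).mp hc))
      have hcnt : ∀ c, x.toList.count c = y.toList.count c := by
        intro c
        by_cases hc : c ∈ x.toList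
        · have hi := hall c ((PySem.Set.mem_ofList _ _).mpr hc)
          rw [hsome c (hsub c hc)] at hi
          simp only [Bool.and_eq_true, beq_iff_eq] at hi
          rw [← pv_len_pos, ← pv_len_pos]
          exact hi.1.symm
        · have hd : c ∉ y.toList := by
            intro hcd
            exact hc ((PySem.Set.mem_ofList _ _).mp
              (hkeys.mem_iff.mpr ((PySem.Set.mem_ofList _ _).mpr hcd)))
          rw [List.count_eq_zero.mpr hc, List.count_eq_zero.mpr hd]
      refine ⟨List.perm_iff_count.mpr hcnt, fun c => ?_⟩
      by_cases hc : c ∈ x.toList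
      · have hi := hall c ((PySem.Set.mem_ofList _ _).mpr hc)
        rw [hsome c (hsub c hc)] at hi
        simp only [Bool.and_eq_true, beq_iff_eq] at hi
        exact hi.2
      · simp [pvOK, pvPos, pv_G_nil_of_not_mem x.toList c hc]
    · rintro ⟨hperm, hok⟩
      intro c hc
      have hcc : c ∈ x.toList := (PySem.Set.mem_ofList _ _).mp hc
      have hcd : c ∈ y.toList := hperm.mem_iff.mp hcc
      rw [hsome c hcd]
      have hlen : (pvPos y.toList c).length = (pvPos x.toList c).length := by
        rw [pv_len_pos, pv_len_pos, hperm.count_eq]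
      simp only [Bool.and_eq_true, beq_iff_eq]
      exact ⟨hlen, hok c⟩
  · rw [if_pos (by simpa using hsz)]
    constructor
    · intro h'; simp at h'
    · rintro ⟨hperm, _⟩
      exfalso
      apply hsz
      exact ((List.perm_ext_iff_of_nodup (PySem.Set.nodup_ofList _)
        (PySem.Set.nodup_ofList _)).mpr
        (fun a => by rw [PySem.Set.mem_ofList, PySem.Set.mem_ofList];
                     exact hperm.mem_iff)).length_eq

lemma pv_A_false (x y : String) (t : Int) (h : x.toList.length ≠ y.toList.length) :
    tanagram x y t = false := by
  unfold tanagram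
  simp only [PySem.Str.len_eq]
  split_ifs with hc
  · rfl
  · exfalso
    apply h
    rw [not_ne_iff] at hc
    exact_mod_cast hc.symm

lemma pv_B_false (x y : String) (t : Int) (h : x.toList.length ≠ y.toList.length) :
    tanagram_alt x y t = false := by
  unfold tanagram_alt
  simp only [PySem.Str.len_eq]
  split_ifs with hc h2
  · rfl
  · rfl
  · exfalso
    apply h
    rw [not_ne_iff] at hc
    exact_mod_cast hc

-- ===== VERDICT (by name: the statement is the Claim_ definition above) =====
theorem tanagram_spec : Claim_equal_tanagram := by
  intro x y t _
  unfold Spec_tanagram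
  by_cases h : x.toList.length = y.toList.length
  · rw [Bool.eq_iff_iff, pv_A_true_iff x y t h, pv_B_true_iff x y t h]
  · rw [pv_A_false x y t h, pv_B_false x y t h]
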